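-- pv_equiv track=rewrite | github.com/S-TJones/My-Intro-to-Artificial-Intelligence | Search Helper/uniform_cost.py | insert_into
-- ===== SOURCE A (Python) =====
-- def insert_into(queue, element):
--
--     # This function assumes the queue is already sorted
--     number = element[1]
--     new_location = -1
--
--     for x in range(len(queue)):
--         node = queue[x]
--         node_num = node[1]
--
--         if number < node_num:
--             new_location = x
--             break
--
--     # Check to see if the index was updated
--     if new_location == -1:
--         queue.append(element)
--     else:
--         queue.insert(new_location, element)
--
--     return queue
-- ===== SOURCE B (Python) =====
-- def insert_into(queue, element):
--     # Split the queue into the prefix of nodes whose key is <= element's key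
--     # and the rest, then rebuild it as prefix + [element] + rest.
--     prefix = []
--     rest = queue[:]
--     while True:
--         if not rest:
--             result = prefix + [element]
--             break
--         h = rest[0]
--         if h[1] <= element[1]:
--             prefix = prefix + [h]
--             rest = rest[1:]
--         else:
--             result = prefix + [element] + rest
--             break
--     queue[:] = result
--     return queue
-- ===== Notes on version B (the rewrite author's own statement) =====
-- stated objective: alternative
-- what changed: Replaces the index-scan-with-sentinel (-1 flag, break, append-vs-insert branch) by a prefix/rest split: peel off the nodes whose key is <= the element's key, then rebuild the list as prefix + [element] + rest.
import Mathlib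
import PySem

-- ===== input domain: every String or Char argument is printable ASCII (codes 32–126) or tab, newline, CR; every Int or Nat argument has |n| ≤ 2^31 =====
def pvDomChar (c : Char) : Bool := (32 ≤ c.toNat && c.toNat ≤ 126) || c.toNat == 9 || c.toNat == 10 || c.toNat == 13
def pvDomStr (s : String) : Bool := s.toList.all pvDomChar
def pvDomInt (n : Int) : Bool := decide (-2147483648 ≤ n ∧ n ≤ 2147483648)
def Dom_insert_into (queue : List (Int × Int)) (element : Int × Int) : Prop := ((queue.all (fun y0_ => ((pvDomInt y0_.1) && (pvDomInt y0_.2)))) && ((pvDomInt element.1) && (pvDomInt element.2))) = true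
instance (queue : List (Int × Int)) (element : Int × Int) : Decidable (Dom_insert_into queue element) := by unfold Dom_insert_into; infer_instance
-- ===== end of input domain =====

-- B replaces A's index scan with a -1 sentinel and append/insert branch by a prefix/rest
-- split: peel off the nodes with key <= the element's key, then rebuild prefix+[element]+rest (alternative).
-- Both A and B mutate `queue` in place in Python; the equivalence proved here is about the return value.


-- ===== PORT A =====
-- the 'for x in range(len(queue))' loop with its break: walks the nodes in order,
-- carrying the current index x, returning the first x with number < node[1], else -1
def insert_into_loop (number : Int) : List (Int × Int) → Int → Int
  | [], _ => -1
  | node :: t, x => if number < node.2 then x else insert_into_loop number t (x + 1)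

def insert_into (queue : List (Int × Int)) (element : Int × Int) : List (Int × Int) :=
  let number := element.2
  let new_location := insert_into_loop number queue 0
  if new_location == -1 then queue ++ [element]
  else PySem.List.insert queue new_location element

-- ===== PORT B =====
-- Source B's while loop: carries (acc, rest), peeling nodes with key <= element's key
def insert_into_altGo (element : Int × Int) : List (Int × Int) → List (Int × Int) → List (Int × Int)
  | acc, [] => acc ++ [element]
  | acc, h :: t =>
    if h.2 ≤ element.2 then insert_into_altGo element (acc ++ [h]) t
    else acc ++ element :: h :: t

def insert_into_alt (queue : List (Int × Int)) (element : Int × Int) : List (Int × Int) :=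
  insert_into_altGo element [] queue

-- ===== PRECONDITION & SPEC =====
def Spec_insert_into (queue : List (Int × Int)) (element : Int × Int) (out : List (Int × Int)) : Prop := out = insert_into_alt queue element
instance (queue : List (Int × Int)) (element : Int × Int) (out : List (Int × Int)) : Decidable (Spec_insert_into queue element out) := by unfold Spec_insert_into; infer_instance

-- ===== CLAIM (what is proved, stated in full; the proofs are below) =====
def Claim_equal_insert_into : Prop := ∀ (queue : List (Int × Int)) (element : Int × Int), Dom_insert_into queue element → Spec_insert_into queue element (insert_into queue element)

-- ===== LEMMAS AND PROOFS =====

-- proof helper: recursive form of the insertion (element before the first strictly greater key)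
def altRec (element : Int × Int) : List (Int × Int) → List (Int × Int)
  | [] => [element]
  | h :: t => if element.2 < h.2 then element :: h :: t else h :: altRec element t

-- B's accumulator loop equals acc ++ the recursive form
theorem altGo_eq_altRec (e : Int × Int) : ∀ (rest acc : List (Int × Int)),
    insert_into_altGo e acc rest = acc ++ altRec e rest := by
  intro rest
  induction rest with
  | nil => intro acc; rfl
  | cons h t ih =>
    intro acc
    simp only [insert_into_altGo, altRec]
    by_cases hle : h.2 ≤ e.2
    · rw [if_pos hle, if_neg (by omega), ih]
      simp
    · rw [if_neg hle, if_pos (by omega)]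

-- Option-valued characterisation of A's scan: index of the first strictly greater key
def findGo (n : Int) : List (Int × Int) → Option Nat
  | [] => none
  | h :: t => if n < h.2 then some 0 else (findGo n t).map (· + 1)

theorem insert_into_loop_eq (n : Int) : ∀ (t : List (Int × Int)) (i : Int),
    insert_into_loop n t i = match findGo n t with | none => -1 | some j => i + j := by
  intro t
  induction t with
  | nil => intro i; rfl
  | cons h t ih =>
    intro i
    simp only [insert_into_loop, findGo]
    split_ifs with hlt
    · simp
    · rw [ih (i + 1)]
      cases findGo n t with
      | none => simp
      | some j => simp; ring

theorem findGo_lt (n : Int) : ∀ (t : List (Int × Int)) (j : Nat),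
    findGo n t = some j → j < t.length := by
  intro t
  induction t with
  | nil => intro j h; simp [findGo] at h
  | cons h t ih =>
    intro j hj
    simp only [findGo] at hj
    split_ifs at hj with hlt
    · simp only [Option.some.injEq] at hj
      simp [← hj]
    · cases hfind : findGo n t with
      | none => rw [hfind] at hj; simp at hj
      | some k =>
        rw [hfind] at hj
        simp only [Option.map_some, Option.some.injEq] at hj
        have := ih k hfind
        simp only [List.length_cons]
        omega

theorem insert_into_eq_altRec (e : Int × Int) : ∀ (q : List (Int × Int)),
    insert_into q e = altRec e q := by
  intro q
  induction q with
  | nil => rfl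
  | cons h t ih =>
    simp only [insert_into] at *
    by_cases hlt : e.2 < h.2
    · have hL : insert_into_loop e.2 (h :: t) 0 = 0 := by
        simp [insert_into_loop, hlt]
      rw [hL]
      simp [altRec, hlt, PySem.List.insert_zero]
    · have hL : insert_into_loop e.2 (h :: t) 0 = insert_into_loop e.2 t 1 := by
        simp [insert_into_loop, hlt]
      rw [hL, insert_into_loop_eq] at *
      cases hfind : findGo e.2 t with
      | none =>
        rw [hfind] at ih
        simp only [BEq.rfl, if_true] at ih ⊢
        simp [altRec, hlt, ← ih]
      | some j =>
        rw [hfind] at ih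
        have hjlt := findGo_lt e.2 t j hfind
        have hA : ((1 : Int) + (j : Int) == -1) = false := by simp; omega
        have hB : ((0 : Int) + (j : Int) == -1) = false := by simp
        simp only [hA, hB, Bool.false_eq_true, if_false] at ih ⊢
        have e1 : ((1 : Int) + ↑j) = ((j + 1 : Nat) : Int) := by push_cast; ring
        have e2 : ((0 : Int) + ↑j) = ((j : Nat) : Int) := by ring
        rw [e1, PySem.List.insert_natCast _ _ _ (by simp; omega)]
        rw [e2, PySem.List.insert_natCast _ _ _ (by omega)] at ih
        simp only [List.take_succ_cons, List.drop_succ_cons, List.cons_append]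
        simp [altRec, hlt, ← ih]

-- ===== VERDICT (by name: the statement is the Claim_ definition above) =====
theorem insert_into_spec : Claim_equal_insert_into := by
  intro queue element _
  unfold Spec_insert_into insert_into_alt
  rw [altGo_eq_altRec, List.nil_append]
  exact insert_into_eq_altRec element queue
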